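-- pv_equiv track=rewrite | github.com/agidesigner/OpenLucid | app/application/setting_service.py | _pick_recommended
-- ===== SOURCE A (Python) =====
-- def _pick_recommended(model_ids: list[str], provider: str) -> str:
--     if not model_ids:
--         return ""
--     if provider == "openai":
--         for m in model_ids:
--             if m == "gpt-4o":
--                 return m
--     elif provider == "anthropic":
--         for m in model_ids:
--             if "claude-opus" in m:
--                 return m
--         for m in model_ids:
--             if "claude-sonnet" in m:
--                 return m
--     elif provider == "gemini":
--         for preferred in ("gemini-2.5-pro", "gemini-2.5-flash", "gemini-2.0-flash"):
--             for m in model_ids: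
--                 if m.startswith(preferred):
--                     return m
--     elif provider == "minimax":
--         for m in model_ids:
--             if m == "MiniMax-M2.7":
--                 return m
--     elif provider == "deepseek":
--         for m in model_ids:
--             if m == "deepseek-chat":
--                 return m
--     elif provider == "kimi":
--         for preferred in ("kimi-k2.6", "kimi-k2.5", "moonshot-v1-32k"):
--             if preferred in model_ids:
--                 return preferred
--     elif provider == "grok":
--         for preferred in ("grok-4-latest", "grok-4-0709", "grok-3", "grok-3-mini"):
--             if preferred in model_ids:
--                 return preferred
--     elif provider == "ollama":
--         for preferred in ("llama3.2:latest", "llama3:latest", "qwen2.5:latest", "mistral:latest"):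
--             if preferred in model_ids:
--                 return preferred
--     return model_ids[0]
-- ===== SOURCE B (Python) =====
-- _RULES = {
--     "openai": [("gpt-4o", "exact")],
--     "anthropic": [("claude-opus", "substring"), ("claude-sonnet", "substring")],
--     "gemini": [("gemini-2.5-pro", "prefix"), ("gemini-2.5-flash", "prefix"),
--                ("gemini-2.0-flash", "prefix")],
--     "minimax": [("MiniMax-M2.7", "exact")],
--     "deepseek": [("deepseek-chat", "exact")],
--     "kimi": [("kimi-k2.6", "exact"), ("kimi-k2.5", "exact"),
--              ("moonshot-v1-32k", "exact")],
--     "grok": [("grok-4-latest", "exact"), ("grok-4-0709", "exact"),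
--              ("grok-3", "exact"), ("grok-3-mini", "exact")],
--     "ollama": [("llama3.2:latest", "exact"), ("llama3:latest", "exact"),
--                ("qwen2.5:latest", "exact"), ("mistral:latest", "exact")],
-- }
--
--
-- def _pick_recommended(model_ids: list[str], provider: str) -> str:
--     # Score each model id once (rank = index of the first preference rule it
--     # satisfies, len(rules) if none) and return the argmin; Python's min keeps
--     # the first element on ties, so the list order breaks ties exactly as A's
--     # cascaded scans do.
--     if not model_ids:
--         return ""
--     rules = _RULES.get(provider, [])
--
--     def rank(m):
--         for i, (pat, mode) in enumerate(rules):
--             if mode == "exact":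
--                 hit = m == pat
--             elif mode == "substring":
--                 hit = pat in m
--             else:
--                 hit = m.startswith(pat)
--             if hit:
--                 return i
--         return len(rules)
--
--     return min(model_ids, key=rank)
-- ===== Notes on version B (the rewrite author's own statement) =====
-- stated objective: alternative
-- what changed: Inverts the traversal: instead of A's rule-major cascaded scans (try each preference pattern against the whole list, return on first hit), B scores every model id once with a rank function (index of the first rule it satisfies) and returns the argmin via min(key=rank), with first-on-tie giving A's exact tie-breaking and the all-unranked case collapsing to model_ids[0].
import Mathlib
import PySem

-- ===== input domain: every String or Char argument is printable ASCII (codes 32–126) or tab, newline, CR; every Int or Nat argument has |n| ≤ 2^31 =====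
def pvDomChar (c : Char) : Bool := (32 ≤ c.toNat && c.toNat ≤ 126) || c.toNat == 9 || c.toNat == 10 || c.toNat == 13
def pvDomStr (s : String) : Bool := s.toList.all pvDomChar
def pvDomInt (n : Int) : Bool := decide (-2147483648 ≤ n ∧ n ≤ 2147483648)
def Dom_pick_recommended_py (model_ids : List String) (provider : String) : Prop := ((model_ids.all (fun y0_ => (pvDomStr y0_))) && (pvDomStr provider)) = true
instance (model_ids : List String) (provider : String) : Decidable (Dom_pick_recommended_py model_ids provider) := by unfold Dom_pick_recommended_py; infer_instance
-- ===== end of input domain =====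

-- B inverts the traversal: it scores each model id once (rank = index of the first
-- preference rule it satisfies) and returns the first argmin via min(key=rank),
-- instead of A's rule-major cascaded scans (objective: alternative).

-- ===== PORT A =====
-- literal transliteration: each 'for m in model_ids: if cond: return m' is a find?,
-- each 'for preferred in (...)' over a literal tuple is a findSome? over the literal list.
def pick_recommended_py (model_ids : List String) (provider : String) : String :=
  if model_ids = [] then ""
  else
    let r : Option String :=
      if provider = "openai" then
        model_ids.find? (fun m => m == "gpt-4o")
      else if provider = "anthropic" then
        match model_ids.find? (fun m => PySem.Str.isIn "claude-opus" m) with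
        | some m => some m
        | none => model_ids.find? (fun m => PySem.Str.isIn "claude-sonnet" m)
      else if provider = "gemini" then
        ["gemini-2.5-pro", "gemini-2.5-flash", "gemini-2.0-flash"].findSome?
          (fun preferred => model_ids.find? (fun m => PySem.Str.startswith m preferred))
      else if provider = "minimax" then
        model_ids.find? (fun m => m == "MiniMax-M2.7")
      else if provider = "deepseek" then
        model_ids.find? (fun m => m == "deepseek-chat")
      else if provider = "kimi" then
        ["kimi-k2.6", "kimi-k2.5", "moonshot-v1-32k"].findSome?
          (fun preferred => if model_ids.contains preferred then some preferred else none)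
      else if provider = "grok" then
        ["grok-4-latest", "grok-4-0709", "grok-3", "grok-3-mini"].findSome?
          (fun preferred => if model_ids.contains preferred then some preferred else none)
      else if provider = "ollama" then
        ["llama3.2:latest", "llama3:latest", "qwen2.5:latest", "mistral:latest"].findSome?
          (fun preferred => if model_ids.contains preferred then some preferred else none)
      else none
    match r with
    | some m => m
    | none => model_ids.headD ""   -- model_ids[0]; the list is nonempty here

-- ===== PORT B =====
inductive PickMode
  | exact
  | substring
  | prefix
deriving DecidableEq, Repr

-- Source B's _RULES (an insertion-ordered dict)
def pickRules : PySem.Dict String (List (String × PickMode)) :=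
  PySem.Dict.mk [("openai", [("gpt-4o", PickMode.exact)]),
   ("anthropic", [("claude-opus", PickMode.substring), ("claude-sonnet", PickMode.substring)]),
   ("gemini", [("gemini-2.5-pro", PickMode.prefix), ("gemini-2.5-flash", PickMode.prefix),
               ("gemini-2.0-flash", PickMode.prefix)]),
   ("minimax", [("MiniMax-M2.7", PickMode.exact)]),
   ("deepseek", [("deepseek-chat", PickMode.exact)]),
   ("kimi", [("kimi-k2.6", PickMode.exact), ("kimi-k2.5", PickMode.exact),
             ("moonshot-v1-32k", PickMode.exact)]),
   ("grok", [("grok-4-latest", PickMode.exact), ("grok-4-0709", PickMode.exact),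
             ("grok-3", PickMode.exact), ("grok-3-mini", PickMode.exact)]),
   ("ollama", [("llama3.2:latest", PickMode.exact), ("llama3:latest", PickMode.exact),
               ("qwen2.5:latest", PickMode.exact), ("mistral:latest", PickMode.exact)])]

-- does model id m satisfy one rule? (the three-way 'hit' test inside Source B's rank)
def pickMatches (m : String) (r : String × PickMode) : Bool :=
  match r.2 with
  | PickMode.exact => m == r.1
  | PickMode.substring => PySem.Str.isIn r.1 m
  | PickMode.prefix => PySem.Str.startswith m r.1

-- Source B's rank: index of the first rule m satisfies, len(rules) if none
def pickRank (rules : List (String × PickMode)) (m : String) : Nat :=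
  match rules with
  | [] => 0
  | r :: rs => if pickMatches m r then 0 else pickRank rs m + 1

def pick_recommended_py_alt (model_ids : List String) (provider : String) : String :=
  if model_ids = [] then ""
  else
    -- min(model_ids, key=rank); the list is nonempty here so min? is some
    (PySem.List.min? model_ids (pickRank (PySem.Dict.getD pickRules provider []))).getD ""

-- ===== PRECONDITION & SPEC =====
def Spec_pick_recommended_py (model_ids : List String) (provider : String) (out : String) : Prop := out = pick_recommended_py_alt model_ids provider
instance (model_ids : List String) (provider : String) (out : String) : Decidable (Spec_pick_recommended_py model_ids provider out) := by unfold Spec_pick_recommended_py; infer_instance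

-- ===== CLAIM (what is proved, stated in full; the proofs are below) =====
def Claim_equal_pick_recommended_py : Prop := ∀ (model_ids : List String) (provider : String), Dom_pick_recommended_py model_ids provider → Spec_pick_recommended_py model_ids provider (pick_recommended_py model_ids provider)

-- ===== LEMMAS AND PROOFS =====

-- one step of Python min's first-wins fold, at the level of min?
theorem min?_cons₂ (k : String → Nat) (x y : String) (xs : List String) :
    PySem.List.min? (x :: y :: xs) k
    = PySem.List.min? ((if k y < k x then y else x) :: xs) k := by
  by_cases h : k y < k x <;> simp [PySem.List.min?, List.foldl, h]

theorem min?_single (k : String → Nat) (x : String) :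
    PySem.List.min? [x] k = some x := by
  simp [PySem.List.min?, List.foldl]

-- min keeps its first element when nothing strictly beats it
theorem min?_keep (k : String → Nat) (x : String) (xs : List String)
    (h : ∀ y ∈ xs, ¬ k y < k x) :
    PySem.List.min? (x :: xs) k = some x := by
  induction xs generalizing x with
  | nil => exact min?_single k x
  | cons y ys ih =>
    rw [min?_cons₂, if_neg (h y (by simp))]
    exact ih x (fun z hz => h z (by simp [hz]))

-- if a later element has rank 0 and the head does not, min returns the FIRST rank-0 element
theorem min?_zero (k : String → Nat) (xs : List String) (x m0 : String)
    (hb : k x ≠ 0) (h : xs.find? (fun m => k m == 0) = some m0) :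
    PySem.List.min? (x :: xs) k = some m0 := by
  induction xs generalizing x with
  | nil => simp at h
  | cons y ys ih =>
    rw [min?_cons₂]
    by_cases hy : k y = 0
    · have hm0 : m0 = y := by simp [List.find?, hy] at h; exact h.symm
      rw [if_pos (by omega), hm0]
      exact min?_keep k y ys (fun z _ => by omega)
    · have h' : ys.find? (fun m => k m == 0) = some m0 := by
        have : (k y == 0) = false := by simp [hy]
        simpa [List.find?, this] using h
      by_cases hlt : k y < k x
      · rw [if_pos hlt]; exact ih y hy h'
      · rw [if_neg hlt]; exact ih x hb h'

-- shifting every rank by +1 does not change which element min picks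
theorem min?_shift (k1 k2 : String → Nat) (x : String) (xs : List String)
    (h : ∀ y ∈ x :: xs, k1 y = k2 y + 1) :
    PySem.List.min? (x :: xs) k1 = PySem.List.min? (x :: xs) k2 := by
  induction xs generalizing x with
  | nil => rw [min?_single, min?_single]
  | cons y ys ih =>
    have hb : k1 x = k2 x + 1 := h x (by simp)
    have hx : k1 y = k2 y + 1 := h y (by simp)
    rw [min?_cons₂, min?_cons₂]
    by_cases hlt : k2 y < k2 x
    · rw [if_pos hlt, if_pos (by omega)]
      exact ih y (fun z hz => h z (by simp only [List.mem_cons] at hz ⊢; tauto))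
    · rw [if_neg hlt, if_neg (by omega)]
      exact ih x (fun z hz => h z (by simp only [List.mem_cons] at hz ⊢; tauto))

-- MAIN: A's rule-major cascaded scan equals B's first-argmin-by-rank, for any rule list
theorem scan_eq_min (rules : List (String × PickMode)) (x : String) (xs : List String) :
    (rules.findSome? (fun r => (x :: xs).find? (fun m => pickMatches m r))).getD x
    = (PySem.List.min? (x :: xs) (pickRank rules)).getD "" := by
  induction rules with
  | nil =>
    rw [min?_keep (pickRank []) x xs (fun y _ => by simp [pickRank])]
    rfl
  | cons r rs ih =>
    cases h : (x :: xs).find? (fun m => pickMatches m r) with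
    | some m0 =>
      simp only [List.findSome?, h, Option.getD]
      by_cases hx : pickMatches x r
      · have hm0 : m0 = x := by simp [List.find?, hx] at h; exact h.symm
        rw [min?_keep (pickRank (r :: rs)) x xs
          (fun y _ => by simp [pickRank, hx]), hm0]
      · have hxr : pickRank (r :: rs) x ≠ 0 := by simp [pickRank, hx]
        have h' : xs.find? (fun m => pickRank (r :: rs) m == 0) = some m0 := by
          have hpred : (fun m => pickRank (r :: rs) m == 0)
              = (fun m => pickMatches m r) := by
            funext m
            by_cases hm : pickMatches m r <;> simp [pickRank, hm]
          rw [hpred]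
          simpa [List.find?, hx] using h
        rw [min?_zero (pickRank (r :: rs)) xs x m0 hxr h']
    | none =>
      have hnone : ∀ m ∈ x :: xs, ¬ pickMatches m r = true := List.find?_eq_none.mp h
      simp only [List.findSome?, h]
      rw [ih, min?_shift (pickRank (r :: rs)) (pickRank rs) x xs
        (fun y hy => by simp [pickRank, hnone y hy])]

-- scanning the list for an element equal to p is the same as a membership test on p
theorem find?_beq_eq_if_contains (ids : List String) (p : String) :
    ids.find? (fun m => m == p) = if ids.contains p then some p else none := by
  induction ids with
  | nil => simp
  | cons x xs ih =>
    by_cases h : x = p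
    · simp [List.find?, h]
    · have hb : (x == p) = false := beq_eq_false_iff_ne.mpr h
      simp [List.find?, hb, Ne.symm h, ih]

-- unfolding one rule's match test for each mode (so rewriting stays at the Str level)
theorem pickMatches_exact (m p : String) : pickMatches m (p, PickMode.exact) = (m == p) := rfl
theorem pickMatches_substring (m p : String) :
    pickMatches m (p, PickMode.substring) = PySem.Str.isIn p m := rfl
theorem pickMatches_prefix (m p : String) :
    pickMatches m (p, PickMode.prefix) = PySem.Str.startswith m p := rfl

-- ===== VERDICT (by name: the statement is the Claim_ definition above) =====
theorem pick_recommended_py_spec : Claim_equal_pick_recommended_py := by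
  intro model_ids provider _
  unfold Spec_pick_recommended_py pick_recommended_py pick_recommended_py_alt
  by_cases h0 : model_ids = []
  · simp [h0]
  · obtain ⟨x, xs, rfl⟩ : ∃ a l, model_ids = a :: l := by
      cases model_ids with
      | nil => exact absurd rfl h0
      | cons a l => exact ⟨a, l, rfl⟩
    simp only [if_neg h0]
    by_cases h1 : provider = "openai"
    · subst h1
      have hopt : List.findSome? (fun r => (x :: xs).find? (fun m => pickMatches m r))
          ([("gpt-4o", PickMode.exact)]) = ((x :: xs).find? (fun m => m == "gpt-4o")) := by
        simp only [List.findSome?_cons, List.findSome?_nil, pickMatches_exact]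
        cases hf : (x :: xs).find? (fun m => m == "gpt-4o") <;> simp
      have hs := scan_eq_min ([("gpt-4o", PickMode.exact)]) x xs
      rw [hopt] at hs
      simp only [reduceIte,
        show PySem.Dict.getD pickRules "openai" ([] : List (String × PickMode)) = ([("gpt-4o", PickMode.exact)]) from rfl]
      cases hf : ((x :: xs).find? (fun m => m == "gpt-4o")) <;> (rw [hf] at hs; simpa using hs)
    by_cases h2 : provider = "anthropic"
    · subst h2
      have hopt : List.findSome? (fun r => (x :: xs).find? (fun m => pickMatches m r))
          ([("claude-opus", PickMode.substring), ("claude-sonnet", PickMode.substring)]) = (match (x :: xs).find? (fun m => PySem.Str.isIn "claude-opus" m) with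
            | some m => some m
            | none => (x :: xs).find? (fun m => PySem.Str.isIn "claude-sonnet" m)) := by
        simp only [List.findSome?_cons, List.findSome?_nil, pickMatches_substring]
        cases hf : (x :: xs).find? (fun m => PySem.Str.isIn "claude-opus" m)
        · cases hg : (x :: xs).find? (fun m => PySem.Str.isIn "claude-sonnet" m) <;> simp
        · simp
      have hs := scan_eq_min ([("claude-opus", PickMode.substring), ("claude-sonnet", PickMode.substring)]) x xs
      rw [hopt] at hs
      simp only [reduceIte,
        show PySem.Dict.getD pickRules "anthropic" ([] : List (String × PickMode)) = ([("claude-opus", PickMode.substring), ("claude-sonnet", PickMode.substring)]) from rfl]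
      cases hf : (match (x :: xs).find? (fun m => PySem.Str.isIn "claude-opus" m) with
            | some m => some m
            | none => (x :: xs).find? (fun m => PySem.Str.isIn "claude-sonnet" m)) <;> (rw [hf] at hs; simpa using hs)
    by_cases h3 : provider = "gemini"
    · subst h3
      have hopt : List.findSome? (fun r => (x :: xs).find? (fun m => pickMatches m r))
          ([("gemini-2.5-pro", PickMode.prefix), ("gemini-2.5-flash", PickMode.prefix), ("gemini-2.0-flash", PickMode.prefix)]) = (["gemini-2.5-pro", "gemini-2.5-flash", "gemini-2.0-flash"].findSome?
            (fun preferred => (x :: xs).find? (fun m => PySem.Str.startswith m preferred))) := by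
        simp only [List.findSome?_cons, List.findSome?_nil, pickMatches_prefix]
      have hs := scan_eq_min ([("gemini-2.5-pro", PickMode.prefix), ("gemini-2.5-flash", PickMode.prefix), ("gemini-2.0-flash", PickMode.prefix)]) x xs
      rw [hopt] at hs
      simp only [reduceIte,
        show PySem.Dict.getD pickRules "gemini" ([] : List (String × PickMode)) = ([("gemini-2.5-pro", PickMode.prefix), ("gemini-2.5-flash", PickMode.prefix), ("gemini-2.0-flash", PickMode.prefix)]) from rfl]
      cases hf : (["gemini-2.5-pro", "gemini-2.5-flash", "gemini-2.0-flash"].findSome?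
            (fun preferred => (x :: xs).find? (fun m => PySem.Str.startswith m preferred))) <;> (rw [hf] at hs; simpa using hs)
    by_cases h4 : provider = "minimax"
    · subst h4
      have hopt : List.findSome? (fun r => (x :: xs).find? (fun m => pickMatches m r))
          ([("MiniMax-M2.7", PickMode.exact)]) = ((x :: xs).find? (fun m => m == "MiniMax-M2.7")) := by
        simp only [List.findSome?_cons, List.findSome?_nil, pickMatches_exact]
        cases hf : (x :: xs).find? (fun m => m == "MiniMax-M2.7") <;> simp
      have hs := scan_eq_min ([("MiniMax-M2.7", PickMode.exact)]) x xs
      rw [hopt] at hs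
      simp only [reduceIte,
        show PySem.Dict.getD pickRules "minimax" ([] : List (String × PickMode)) = ([("MiniMax-M2.7", PickMode.exact)]) from rfl]
      cases hf : ((x :: xs).find? (fun m => m == "MiniMax-M2.7")) <;> (rw [hf] at hs; simpa using hs)
    by_cases h5 : provider = "deepseek"
    · subst h5
      have hopt : List.findSome? (fun r => (x :: xs).find? (fun m => pickMatches m r))
          ([("deepseek-chat", PickMode.exact)]) = ((x :: xs).find? (fun m => m == "deepseek-chat")) := by
        simp only [List.findSome?_cons, List.findSome?_nil, pickMatches_exact]
        cases hf : (x :: xs).find? (fun m => m == "deepseek-chat") <;> simp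
      have hs := scan_eq_min ([("deepseek-chat", PickMode.exact)]) x xs
      rw [hopt] at hs
      simp only [reduceIte,
        show PySem.Dict.getD pickRules "deepseek" ([] : List (String × PickMode)) = ([("deepseek-chat", PickMode.exact)]) from rfl]
      cases hf : ((x :: xs).find? (fun m => m == "deepseek-chat")) <;> (rw [hf] at hs; simpa using hs)
    by_cases h6 : provider = "kimi"
    · subst h6
      have hopt : List.findSome? (fun r => (x :: xs).find? (fun m => pickMatches m r))
          ([("kimi-k2.6", PickMode.exact), ("kimi-k2.5", PickMode.exact), ("moonshot-v1-32k", PickMode.exact)]) = (["kimi-k2.6", "kimi-k2.5", "moonshot-v1-32k"].findSome?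
            (fun preferred => if (x :: xs).contains preferred then some preferred else none)) := by
        simp only [List.findSome?_cons, List.findSome?_nil, pickMatches_exact,
          find?_beq_eq_if_contains]
      have hs := scan_eq_min ([("kimi-k2.6", PickMode.exact), ("kimi-k2.5", PickMode.exact), ("moonshot-v1-32k", PickMode.exact)]) x xs
      rw [hopt] at hs
      simp only [reduceIte,
        show PySem.Dict.getD pickRules "kimi" ([] : List (String × PickMode)) = ([("kimi-k2.6", PickMode.exact), ("kimi-k2.5", PickMode.exact), ("moonshot-v1-32k", PickMode.exact)]) from rfl]
      cases hf : (["kimi-k2.6", "kimi-k2.5", "moonshot-v1-32k"].findSome?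
            (fun preferred => if (x :: xs).contains preferred then some preferred else none)) <;> (rw [hf] at hs; simpa using hs)
    by_cases h7 : provider = "grok"
    · subst h7
      have hopt : List.findSome? (fun r => (x :: xs).find? (fun m => pickMatches m r))
          ([("grok-4-latest", PickMode.exact), ("grok-4-0709", PickMode.exact), ("grok-3", PickMode.exact), ("grok-3-mini", PickMode.exact)]) = (["grok-4-latest", "grok-4-0709", "grok-3", "grok-3-mini"].findSome?
            (fun preferred => if (x :: xs).contains preferred then some preferred else none)) := by
        simp only [List.findSome?_cons, List.findSome?_nil, pickMatches_exact,
          find?_beq_eq_if_contains]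
      have hs := scan_eq_min ([("grok-4-latest", PickMode.exact), ("grok-4-0709", PickMode.exact), ("grok-3", PickMode.exact), ("grok-3-mini", PickMode.exact)]) x xs
      rw [hopt] at hs
      simp only [reduceIte,
        show PySem.Dict.getD pickRules "grok" ([] : List (String × PickMode)) = ([("grok-4-latest", PickMode.exact), ("grok-4-0709", PickMode.exact), ("grok-3", PickMode.exact), ("grok-3-mini", PickMode.exact)]) from rfl]
      cases hf : (["grok-4-latest", "grok-4-0709", "grok-3", "grok-3-mini"].findSome?
            (fun preferred => if (x :: xs).contains preferred then some preferred else none)) <;> (rw [hf] at hs; simpa using hs)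
    by_cases h8 : provider = "ollama"
    · subst h8
      have hopt : List.findSome? (fun r => (x :: xs).find? (fun m => pickMatches m r))
          ([("llama3.2:latest", PickMode.exact), ("llama3:latest", PickMode.exact), ("qwen2.5:latest", PickMode.exact), ("mistral:latest", PickMode.exact)]) = (["llama3.2:latest", "llama3:latest", "qwen2.5:latest", "mistral:latest"].findSome?
            (fun preferred => if (x :: xs).contains preferred then some preferred else none)) := by
        simp only [List.findSome?_cons, List.findSome?_nil, pickMatches_exact,
          find?_beq_eq_if_contains]
      have hs := scan_eq_min ([("llama3.2:latest", PickMode.exact), ("llama3:latest", PickMode.exact), ("qwen2.5:latest", PickMode.exact), ("mistral:latest", PickMode.exact)]) x xs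
      rw [hopt] at hs
      simp only [reduceIte,
        show PySem.Dict.getD pickRules "ollama" ([] : List (String × PickMode)) = ([("llama3.2:latest", PickMode.exact), ("llama3:latest", PickMode.exact), ("qwen2.5:latest", PickMode.exact), ("mistral:latest", PickMode.exact)]) from rfl]
      cases hf : (["llama3.2:latest", "llama3:latest", "qwen2.5:latest", "mistral:latest"].findSome?
            (fun preferred => if (x :: xs).contains preferred then some preferred else none)) <;> (rw [hf] at hs; simpa using hs)
    · -- unknown provider: no rules, both fall back to the first model id
      have hs := scan_eq_min [] x xs
      simp only [List.findSome?_nil, Option.getD] at hs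
      simp only [if_neg h1, if_neg h2, if_neg h3, if_neg h4, if_neg h5, if_neg h6,
        if_neg h7, if_neg h8]
      have hb1 : (("openai" : String) == provider) = false := beq_eq_false_iff_ne.mpr (Ne.symm h1)
      have hb2 : (("anthropic" : String) == provider) = false := beq_eq_false_iff_ne.mpr (Ne.symm h2)
      have hb3 : (("gemini" : String) == provider) = false := beq_eq_false_iff_ne.mpr (Ne.symm h3)
      have hb4 : (("minimax" : String) == provider) = false := beq_eq_false_iff_ne.mpr (Ne.symm h4)
      have hb5 : (("deepseek" : String) == provider) = false := beq_eq_false_iff_ne.mpr (Ne.symm h5)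
      have hb6 : (("kimi" : String) == provider) = false := beq_eq_false_iff_ne.mpr (Ne.symm h6)
      have hb7 : (("grok" : String) == provider) = false := beq_eq_false_iff_ne.mpr (Ne.symm h7)
      have hb8 : (("ollama" : String) == provider) = false := beq_eq_false_iff_ne.mpr (Ne.symm h8)
      simp only [pickRules, PySem.Dict.getD_eq_get?_getD, PySem.Dict.get?_mk_cons,
        hb1, hb2, hb3, hb4, hb5, hb6, hb7, hb8]
      simpa [PySem.Dict.get?, List.headD] using hs
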